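-- pv_equiv track=rewrite | github.com/g0g0gizmo/.githooks | commitmint/cli.py | group_by_language
-- ===== SOURCE A (Python) =====
-- LANG_PATTERNS = {
--     "python": (".py",),
--     "javascript": (".js", ".jsx", ".mjs", ".cjs"),
--     "typescript": (".ts", ".tsx"),
--     "shell": (".sh", ".bash", ".zsh", ".ksh", ".csh"),
--     "perl": (".pl", ".pm", ".t"),
--     "json": (".json",),
--     "yaml": (".yaml", ".yml"),
--     "toml": (".toml",),
--     "markdown": (".md",),
--     "labview": (
--         ".vi",
--         ".vim",
--         ".vit",
--         ".ctl",
--         ".ctt",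
--         ".lvclass",
--         ".lvlib",
--         ".lvproj",
--         ".lvlibp",
--     ),
-- }
--
-- def group_by_language(files):
--     groups = {k: [] for k in LANG_PATTERNS}
--     for f in files:
--         low = f.lower()
--         for lang, exts in LANG_PATTERNS.items():
--             if any(low.endswith(ext) for ext in exts):
--                 groups[lang].append(f)
--                 break
--     return groups
-- ===== SOURCE B (Python) =====
-- EXT_TO_LANG = {
--     ".py": "python",
--     ".js": "javascript", ".jsx": "javascript", ".mjs": "javascript", ".cjs": "javascript",
--     ".ts": "typescript", ".tsx": "typescript",
--     ".sh": "shell", ".bash": "shell", ".zsh": "shell", ".ksh": "shell", ".csh": "shell",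
--     ".pl": "perl", ".pm": "perl", ".t": "perl",
--     ".json": "json",
--     ".yaml": "yaml", ".yml": "yaml",
--     ".toml": "toml",
--     ".md": "markdown",
--     ".vi": "labview", ".vim": "labview", ".vit": "labview", ".ctl": "labview",
--     ".ctt": "labview", ".lvclass": "labview", ".lvlib": "labview", ".lvproj": "labview",
--     ".lvlibp": "labview",
-- }
--
-- LANGS = ["python", "javascript", "typescript", "shell", "perl", "json", "yaml",
--          "toml", "markdown", "labview"]
--
--
-- def _classify(low):
--     i = low.rfind(".")
--     return EXT_TO_LANG.get(low[i:]) if i >= 0 else None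
--
--
-- def group_by_language(files):
--     tags = [_classify(f.lower()) for f in files]
--     return {lang: [f for f, t in zip(files, tags) if t == lang] for lang in LANGS}
-- ===== Notes on version B (the rewrite author's own statement) =====
-- stated objective: alternative
-- what changed: Replaces the incremental dict build with a per-file scan over every language's extension tuple (endswith + break) by a staged pipeline: a literal inverted index ext->lang, one tagging pass computing each file's language from its rfind-based suffix, then one per-language filter comprehension over the tagged list.
import Mathlib
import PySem

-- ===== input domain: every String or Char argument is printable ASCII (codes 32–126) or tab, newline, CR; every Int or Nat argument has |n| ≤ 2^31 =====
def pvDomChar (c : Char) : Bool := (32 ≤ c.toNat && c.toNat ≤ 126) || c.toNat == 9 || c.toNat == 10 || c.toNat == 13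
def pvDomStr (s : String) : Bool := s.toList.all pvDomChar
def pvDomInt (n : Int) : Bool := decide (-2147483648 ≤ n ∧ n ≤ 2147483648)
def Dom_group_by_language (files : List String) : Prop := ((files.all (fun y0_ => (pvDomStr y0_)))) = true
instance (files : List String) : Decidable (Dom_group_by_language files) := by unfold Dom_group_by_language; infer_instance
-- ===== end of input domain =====

-- B replaces A's incremental dict build (per-file scan over every language's extension
-- tuple with endswith + break) by a staged pipeline: a literal inverted index ext -> lang,
-- one tagging pass (rfind-based suffix lookup), then one filter per language.

-- ===== PORT A =====
-- the module constant LANG_PATTERNS (extensions kept as List Char for direct comparison with lowered chars)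
def LANG_PATTERNS : List (String × List (List Char)) :=
  [ ("python", [".py".toList]),
    ("javascript", [".js".toList, ".jsx".toList, ".mjs".toList, ".cjs".toList]),
    ("typescript", [".ts".toList, ".tsx".toList]),
    ("shell", [".sh".toList, ".bash".toList, ".zsh".toList, ".ksh".toList, ".csh".toList]),
    ("perl", [".pl".toList, ".pm".toList, ".t".toList]),
    ("json", [".json".toList]),
    ("yaml", [".yaml".toList, ".yml".toList]),
    ("toml", [".toml".toList]),
    ("markdown", [".md".toList]),
    ("labview", [".vi".toList, ".vim".toList, ".vit".toList, ".ctl".toList, ".ctt".toList,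
                 ".lvclass".toList, ".lvlib".toList, ".lvproj".toList, ".lvlibp".toList]) ]

-- A: for each file, first language whose extensions tuple has a matching endswith (the inner for + break = find?)
def group_by_language (files : List String) : List (String × List String) :=
  (files.foldl
    (fun (groups : PySem.Dict String (List String)) f =>
      let low := PySem.Chars.lower f.toList
      match LANG_PATTERNS.find? (fun p => p.2.any (fun ext => PySem.Chars.endswith low ext)) with
      | some p => groups.modify p.1 [] (fun xs => xs ++ [f])
      | none => groups)
    (PySem.Dict.ofList (LANG_PATTERNS.map (fun p => (p.1, ([] : List String)))))).items

-- ===== PORT B =====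
-- EXT_TO_LANG: a literal inverted index extension -> language (Source B writes it out literally)
def EXT_TO_LANG : PySem.Dict (List Char) String :=
  PySem.Dict.ofList
    [ (".py".toList, "python"),
      (".js".toList, "javascript"), (".jsx".toList, "javascript"),
      (".mjs".toList, "javascript"), (".cjs".toList, "javascript"),
      (".ts".toList, "typescript"), (".tsx".toList, "typescript"),
      (".sh".toList, "shell"), (".bash".toList, "shell"), (".zsh".toList, "shell"),
      (".ksh".toList, "shell"), (".csh".toList, "shell"),
      (".pl".toList, "perl"), (".pm".toList, "perl"), (".t".toList, "perl"),
      (".json".toList, "json"),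
      (".yaml".toList, "yaml"), (".yml".toList, "yaml"),
      (".toml".toList, "toml"),
      (".md".toList, "markdown"),
      (".vi".toList, "labview"), (".vim".toList, "labview"), (".vit".toList, "labview"),
      (".ctl".toList, "labview"), (".ctt".toList, "labview"), (".lvclass".toList, "labview"),
      (".lvlib".toList, "labview"), (".lvproj".toList, "labview"), (".lvlibp".toList, "labview") ]

def LANGS : List String :=
  ["python", "javascript", "typescript", "shell", "perl", "json", "yaml",
   "toml", "markdown", "labview"]

-- _classify(low): EXT_TO_LANG.get(low[low.rfind('.'):]) if that index is >= 0, else None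
def pvClassify (low : List Char) : Option String :=
  let i := PySem.Chars.rfind low ['.']
  if 0 ≤ i then EXT_TO_LANG.get? (PySem.List.slice low (some i) none) else none

-- B: tag every file once, then one filter comprehension per language
def group_by_language_alt (files : List String) : List (String × List String) :=
  let tags := files.map (fun f => pvClassify (PySem.Chars.lower f.toList))
  LANGS.map (fun lang =>
    (lang, ((files.zip tags).filter (fun q => q.2 == some lang)).map (·.1)))

-- ===== PRECONDITION & SPEC =====
def Spec_group_by_language (files : List String) (out : List (String × List String)) : Prop := out = group_by_language_alt files
instance (files : List String) (out : List (String × List String)) : Decidable (Spec_group_by_language files out) := by unfold Spec_group_by_language; infer_instance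

-- ===== CLAIM (what is proved, stated in full; the proofs are below) =====
def Claim_equal_group_by_language : Prop := ∀ (files : List String), Dom_group_by_language files → Spec_group_by_language files (group_by_language files)

-- ===== LEMMAS AND PROOFS =====

-- A's per-file classification: first language whose extensions match (inner for + break)
def classifyA (f : String) : Option String :=
  (LANG_PATTERNS.find? (fun p =>
    p.2.any (fun ext => PySem.Chars.endswith (PySem.Chars.lower f.toList) ext))).map (·.1)

-- rfind.go equation lemmas
theorem rfind_go_zero (s sub : List Char) :
    PySem.Chars.rfind.go s sub 0 = if sub.isPrefixOf s then 0 else -1 := by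
  simp [PySem.Chars.rfind.go]

theorem rfind_go_succ (s sub : List Char) (j : Nat) :
    PySem.Chars.rfind.go s sub (j + 1) =
      if sub.isPrefixOf (s.drop (j + 1)) then ((j : Int) + 1) else PySem.Chars.rfind.go s sub j := by
  simp [PySem.Chars.rfind.go]

-- full characterisation of rfind.go
theorem rfind_go_spec (s sub : List Char) (n : Nat) :
    (PySem.Chars.rfind.go s sub n = -1 ∧ ∀ k ≤ n, ¬ sub <+: s.drop k) ∨
    (∃ m : Nat, PySem.Chars.rfind.go s sub n = m ∧ m ≤ n ∧ sub <+: s.drop m ∧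
      ∀ k, m < k → k ≤ n → ¬ sub <+: s.drop k) := by
  induction n with
  | zero =>
    rw [rfind_go_zero]
    by_cases h : sub.isPrefixOf s
    · right
      exact ⟨0, by simp [h], le_refl 0, by simpa [List.isPrefixOf_iff_prefix] using h,
        fun k hk hk' => absurd (Nat.lt_of_lt_of_le hk hk') (by omega)⟩
    · left
      refine ⟨by simp [h], fun k hk => ?_⟩
      have hk0 : k = 0 := Nat.le_zero.mp hk
      subst hk0
      simpa [List.isPrefixOf_iff_prefix] using h
  | succ j ih =>
    rw [rfind_go_succ]
    by_cases h : sub.isPrefixOf (s.drop (j + 1))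
    · right
      exact ⟨j + 1, by simp [h], le_refl _, by simpa [List.isPrefixOf_iff_prefix] using h,
        fun k hk hk' => absurd (Nat.lt_of_lt_of_le hk hk') (by omega)⟩
    · rcases ih with ⟨he, hall⟩ | ⟨m, he, hm, hpre, hmax⟩
      · left
        refine ⟨by simp [h, he], fun k hk => ?_⟩
        rcases Nat.lt_or_ge k (j + 1) with hk' | hk'
        · exact hall k (by omega)
        · have : k = j + 1 := by omega
          subst this
          simpa [List.isPrefixOf_iff_prefix] using h
      · right
        refine ⟨m, by simp [h, he], by omega, hpre, fun k hk hk' => ?_⟩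
        rcases Nat.lt_or_ge k (j + 1) with hk'' | hk''
        · exact hmax k hk (by omega)
        · have : k = j + 1 := by omega
          subst this
          simpa [List.isPrefixOf_iff_prefix] using h

-- key lemma: for a table extension '.'::t with dot-free t, endswith = "suffix from the last dot equals ext"
theorem endswith_iff_drop_rfind (low t : List Char) (hd : '.' ∉ t) :
    PySem.Chars.endswith low ('.' :: t) = true ↔
      0 ≤ PySem.Chars.rfind low ['.'] ∧
      low.drop (PySem.Chars.rfind low ['.']).toNat = '.' :: t := by
  unfold PySem.Chars.rfind
  constructor
  · intro h
    have hsuf : ('.' :: t) <:+ low := by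
      simpa [PySem.Chars.endswith, List.isSuffixOf_iff_suffix] using h
    obtain ⟨pre, hpre⟩ := hsuf
    have hdropp : low.drop pre.length = '.' :: t := by
      rw [← hpre]; simp
    have hplen : pre.length + (t.length + 1) = low.length := by
      rw [← hpre, List.length_append, List.length_cons]
    have hnod : ∀ k, pre.length < k → ¬ ['.'] <+: low.drop k := by
      intro k hk hpk
      rcases Nat.lt_or_ge k low.length with hkl | hkl
      · have hdk : low.drop k = t.drop (k - pre.length - 1) := by
          have : low.drop k = (low.drop pre.length).drop (k - pre.length) := by
            rw [List.drop_drop]; congr 1; omega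
          rw [this, hdropp]
          have hk1 : k - pre.length = (k - pre.length - 1) + 1 := by omega
          rw [hk1]; simp
        rw [hdk] at hpk
        rcases hpk with ⟨rest, hrest⟩
        have : '.' ∈ t := by
          have : '.' ∈ t.drop (k - pre.length - 1) := by rw [← hrest]; simp
          exact List.mem_of_mem_drop this
        exact hd this
      · rw [List.drop_eq_nil_of_le hkl] at hpk
        simpa using hpk.length_le
    have hpdot : ['.'] <+: low.drop pre.length := by
      rw [hdropp]; simp
    rcases rfind_go_spec low ['.'] low.length with ⟨_, hall⟩ | ⟨m, he, hm, hpre', hmax⟩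
    · exact absurd hpdot (hall pre.length (by omega))
    · have h1 : pre.length ≤ m := by
        by_contra hc
        exact hmax pre.length (by omega) (by omega) hpdot
      have h2 : m ≤ pre.length := by
        by_contra hc
        exact hnod m (by omega) hpre'
      have hmp : m = pre.length := le_antisymm h2 h1
      rw [he, hmp]
      exact ⟨by positivity, by simpa using hdropp⟩
  · rintro ⟨h0, hdrop⟩
    have : ('.' :: t) <:+ low := hdrop ▸ List.drop_suffix _ _
    simpa [PySem.Chars.endswith, List.isSuffixOf_iff_suffix] using this

-- lookup in the flattened inverted index = find-first over the pattern table
theorem find?_flat_inner (exts : List (List Char)) (lang : String) (rest : List (List Char × String)) (S : List Char) :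
    (List.find? (fun q => q.1 == S) (exts.map (fun e => (e, lang)) ++ rest)).map (·.2)
      = if exts.any (fun e => e == S) then some lang
        else (List.find? (fun q => q.1 == S) rest).map (·.2) := by
  induction exts with
  | nil => simp
  | cons e es ih =>
    by_cases h : e = S
    · rw [List.map_cons, List.cons_append,
        List.find?_cons_of_pos (p := fun q => q.1 == S) (a := (e, lang))
          (l := es.map (fun e => (e, lang)) ++ rest) (by simp [h])]
      simp [h]
    · rw [List.map_cons, List.cons_append,
        List.find?_cons_of_neg (p := fun q => q.1 == S) (a := (e, lang))
          (l := es.map (fun e => (e, lang)) ++ rest) (by simp [h]), ih]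
      simp [h]

theorem find?_flat (L : List (String × List (List Char))) (S : List Char) :
    (List.find? (fun q => q.1 == S) (L.flatMap (fun p => p.2.map (fun e => (e, p.1))))).map (·.2)
      = (List.find? (fun p => p.2.any (fun e => e == S)) L).map (·.1) := by
  induction L with
  | nil => simp
  | cons p ps ih =>
    rw [List.flatMap_cons, find?_flat_inner]
    by_cases h : p.2.any (fun e => e == S)
    · rw [if_pos h,
        List.find?_cons_of_pos (p := fun p => p.2.any (fun e => e == S)) (a := p) (l := ps) h]
      rfl
    · rw [if_neg h,
        List.find?_cons_of_neg (p := fun p => p.2.any (fun e => e == S)) (a := p) (l := ps)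
          (by simpa using h), ih]

-- B's literal inverted index has exactly the flattened items of A's table
theorem ext_to_lang_items :
    EXT_TO_LANG.items = LANG_PATTERNS.flatMap (fun p => p.2.map (fun e => (e, p.1))) := by
  decide

-- every table extension is '.' followed by a dot-free tail
theorem table_shape_b : ∀ p ∈ LANG_PATTERNS, ∀ e ∈ p.2,
    e.head? = some '.' ∧ '.' ∉ e.tail := by
  decide

theorem table_shape : ∀ p ∈ LANG_PATTERNS, ∀ e ∈ p.2,
    ∃ t, e = '.' :: t ∧ '.' ∉ t := by
  intro p hp e he
  obtain ⟨hh, ht⟩ := table_shape_b p hp e he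
  cases e with
  | nil => simp at hh
  | cons c t =>
    simp only [List.head?_cons, Option.some.injEq] at hh
    exact ⟨t, by rw [hh], by simpa using ht⟩

theorem find?_congr_mem {α : Type} {p q : α → Bool} (l : List α)
    (h : ∀ a ∈ l, p a = q a) : l.find? p = l.find? q := by
  induction l with
  | nil => rfl
  | cons a as ih =>
    rcases hb : q a with _ | _
    · rw [List.find?_cons_of_neg (by simp [h a (by simp), hb]),
        List.find?_cons_of_neg (by simp [hb])]
      exact ih (fun x hx => h x (by simp [hx]))
    · rw [List.find?_cons_of_pos (by simp [h a (by simp), hb]),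
        List.find?_cons_of_pos hb]

theorem any_congr_mem {α : Type} {p q : α → Bool} (l : List α)
    (h : ∀ a ∈ l, p a = q a) : l.any p = l.any q := by
  induction l with
  | nil => rfl
  | cons a as ih =>
    simp only [List.any_cons, h a (by simp)]
    rw [ih (fun x hx => h x (by simp [hx]))]

-- THE BRIDGE: A's first-match language = B's inverted-index tag
theorem classify_eq (f : String) :
    classifyA f = pvClassify (PySem.Chars.lower f.toList) := by
  unfold classifyA pvClassify
  set low := PySem.Chars.lower f.toList with hlow
  by_cases hneg : 0 ≤ PySem.Chars.rfind low ['.']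
  · rw [if_pos hneg]
    rw [PySem.List.slice_from _ hneg]
    set S := low.drop (PySem.Chars.rfind low ['.']).toNat with hS
    have hcongr : LANG_PATTERNS.find? (fun p => p.2.any (fun ext => PySem.Chars.endswith low ext))
        = LANG_PATTERNS.find? (fun p => p.2.any (fun e => e == S)) := by
      apply find?_congr_mem
      intro p hp
      have : ∀ e ∈ p.2, PySem.Chars.endswith low e = (e == S) := by
        intro e he
        obtain ⟨t, het, hdt⟩ := table_shape p hp e he
        subst het
        rcases hb : PySem.Chars.endswith low ('.' :: t) with _ | _
        · symm
          rw [beq_eq_false_iff_ne]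
          intro hcon
          have : PySem.Chars.endswith low ('.' :: t) = true :=
            (endswith_iff_drop_rfind low t hdt).mpr ⟨hneg, by rw [← hS, ← hcon]⟩
          rw [hb] at this; exact absurd this (by simp)
        · symm
          rw [beq_iff_eq]
          have := (endswith_iff_drop_rfind low t hdt).mp hb
          rw [hS, this.2]
      exact any_congr_mem _ this
    rw [hcongr, PySem.Dict.get?, ext_to_lang_items, find?_flat]
  · rw [if_neg hneg]
    have hfind : LANG_PATTERNS.find? (fun p => p.2.any (fun ext => PySem.Chars.endswith low ext)) = none := by
      rw [List.find?_eq_none]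
      intro p hp
      simp only [List.any_eq_true, not_exists, not_and]
      intro e he hew
      obtain ⟨t, het, hdt⟩ := table_shape p hp e he
      subst het
      have := (endswith_iff_drop_rfind low t hdt).mp hew
      exact hneg this.1
    rw [hfind]; rfl

-- abbreviations for A's fold
def stepA (groups : PySem.Dict String (List String)) (f : String) : PySem.Dict String (List String) :=
  let low := PySem.Chars.lower f.toList
  match LANG_PATTERNS.find? (fun p => p.2.any (fun ext => PySem.Chars.endswith low ext)) with
  | some p => groups.modify p.1 [] (fun xs => xs ++ [f])
  | none => groups

-- stepA written through classifyA
theorem stepA_eq (groups : PySem.Dict String (List String)) (f : String) :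
    stepA groups f = match classifyA f with
      | some lang => groups.modify lang [] (fun xs => xs ++ [f])
      | none => groups := by
  unfold stepA classifyA
  rcases h : LANG_PATTERNS.find? (fun p =>
      p.2.any (fun ext => PySem.Chars.endswith (PySem.Chars.lower f.toList) ext)) with _ | p
  · simp [h]
  · simp [h]

-- a classified language is a key of the table
theorem classifyA_mem (f : String) (lang : String) (h : classifyA f = some lang) :
    lang ∈ LANG_PATTERNS.map (·.1) := by
  unfold classifyA at h
  rcases hf : LANG_PATTERNS.find? (fun p =>
      p.2.any (fun ext => PySem.Chars.endswith (PySem.Chars.lower f.toList) ext)) with _ | p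
  · rw [hf] at h; simp at h
  · rw [hf] at h
    simp only [Option.map_some, Option.some.injEq] at h
    subst h
    exact List.mem_map_of_mem (List.mem_of_find?_eq_some hf)

-- keys stay exactly the table's names through A's fold
theorem foldA_keys (files : List String) (d : PySem.Dict String (List String))
    (hk : d.keys = LANG_PATTERNS.map (·.1)) :
    (files.foldl stepA d).keys = LANG_PATTERNS.map (·.1) := by
  induction files generalizing d with
  | nil => simpa using hk
  | cons f fs ih =>
    rw [List.foldl_cons]
    apply ih
    rw [stepA_eq]
    rcases h : classifyA f with _ | lang
    · exact hk
    · have hmem : lang ∈ d.keys := hk ▸ classifyA_mem f lang h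
      have hc : d.contains lang = true := (PySem.Dict.contains_iff_mem_keys _ _).mpr hmem
      rw [PySem.Dict.keys_modify, PySem.Dict.keys_insert_of_contains _ _ hc]
      exact hk

-- each key's final list = its initial list plus the files classified to it, in order
theorem foldA_getD (files : List String) (d : PySem.Dict String (List String)) (c : String) :
    (files.foldl stepA d).getD c [] = d.getD c [] ++ files.filter (fun f => classifyA f == some c) := by
  induction files generalizing d with
  | nil => simp
  | cons f fs ih =>
    rw [List.foldl_cons, ih, List.filter_cons]
    rw [stepA_eq]
    rcases h : classifyA f with _ | lang
    · simp
    · by_cases hc : lang = c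
      · subst hc
        rw [PySem.Dict.getD_modify_self]
        simp
      · rw [PySem.Dict.getD_modify_of_ne _ _ _ (Ne.symm hc)]
        simp [hc]

-- the initial dict (every language mapped to []) yields [] for every key
theorem init_getD (c : String) :
    (PySem.Dict.ofList (LANG_PATTERNS.map (fun p => (p.1, ([] : List String))))).getD c [] = [] := by
  have h : PySem.Dict.ofList (LANG_PATTERNS.map (fun p => (p.1, ([] : List String))))
      = PySem.Dict.mk (LANG_PATTERNS.map (fun p => (p.1, ([] : List String)))) := by
    apply PySem.Dict.ext
    decide
  rw [h]
  simp only [PySem.Dict.getD_eq_get?_getD, LANG_PATTERNS, List.map]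
  simp only [PySem.Dict.get?_mk_cons]
  split_ifs <;> simp [PySem.Dict.get?]

-- B's zip-filter pass = a direct filter on the files
theorem zip_filter_eq (files : List String) (tag : String → Option String) (c : String) :
    (((files.zip (files.map tag)).filter (fun q => q.2 == some c)).map (·.1))
      = files.filter (fun f => tag f == some c) := by
  induction files with
  | nil => rfl
  | cons f fs ih =>
    simp only [List.map_cons, List.zip_cons_cons, List.filter_cons]
    rcases h : (tag f == some c) with _ | _
    · simpa [h] using ih
    · simpa [h] using congrArg (f :: ·) ih

theorem langs_eq : LANGS = LANG_PATTERNS.map (·.1) := by decide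

theorem nodup_names : (LANG_PATTERNS.map (·.1)).Nodup := by decide

-- ===== VERDICT (by name: the statement is the Claim_ definition above) =====
theorem group_by_language_spec : Claim_equal_group_by_language := by
  intro files _
  unfold Spec_group_by_language group_by_language group_by_language_alt
  show (files.foldl stepA
      (PySem.Dict.ofList (LANG_PATTERNS.map (fun p => (p.1, ([] : List String)))))).items
    = LANGS.map (fun lang =>
        (lang, ((files.zip (files.map (fun f => pvClassify (PySem.Chars.lower f.toList)))).filter
                  (fun q => q.2 == some lang)).map (·.1)))
  have hkeys := foldA_keys files
    (PySem.Dict.ofList (LANG_PATTERNS.map (fun p => (p.1, ([] : List String))))) (by decide)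
  rw [PySem.Dict.items_eq_map_keys _ (by rw [hkeys]; exact nodup_names) ([] : List String),
    hkeys, ← langs_eq]
  apply List.map_congr_left
  intro c _
  rw [foldA_getD, init_getD, List.nil_append, zip_filter_eq]
  simp only [Prod.mk.injEq, true_and]
  apply List.filter_congr
  intro f _
  rw [classify_eq]
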